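-- pv_equiv track=rewrite | github.com/SaiKartheekMV/AEGISCHAIN | ai-agents/utils/threat_db.py | check_contract
-- ===== SOURCE A (Python) =====
-- KNOWN_SAFE_CONTRACTS = {
--     # Mainnet (for reference)
--     "0x7a250d5630b4cf539739df2c5dacb4c659f2488d": "Uniswap V2 Router",
--     "0xe592427a0aece92de3edee1f18e0157c05861564": "Uniswap V3 Router",
--     "0x7d2768de32b0b80b7a3454c06bdac94a69ddc7a9": "Aave V2 Lending Pool",
--     "0x87870bca3f3fd6335c3f4ce8392d69350b4fa4e2": "Aave V3 Lending Pool",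
--     "0xc36442b4a4522e871399cd717abdd847ab11fe88": "Uniswap V3 Positions NFT",
-- }
--
-- KNOWN_MALICIOUS_CONTRACTS = {
--     "0x0000000000000000000000000000000000000000": "Zero address — likely error",
--     "0xdeadbeefdeadbeefdeadbeefdeadbeefdeadbeef": "Dead address — funds unrecoverable",
-- }
--
-- def check_contract(address: str) -> tuple[str, str]:
--     """Returns (status, name) — status: 'safe', 'malicious', 'unknown'"""
--     addr_lower = address.lower()
--     if addr_lower in {k.lower() for k in KNOWN_SAFE_CONTRACTS}:
--         name = next(v for k, v in KNOWN_SAFE_CONTRACTS.items() if k.lower() == addr_lower)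
--         return "safe", name
--     if addr_lower in {k.lower() for k in KNOWN_MALICIOUS_CONTRACTS}:
--         name = next(v for k, v in KNOWN_MALICIOUS_CONTRACTS.items() if k.lower() == addr_lower)
--         return "malicious", name
--     return "unknown", "Unverified contract"
-- ===== SOURCE B (Python) =====
-- KNOWN_SAFE_CONTRACTS = {
--     "0x7a250d5630b4cf539739df2c5dacb4c659f2488d": "Uniswap V2 Router",
--     "0xe592427a0aece92de3edee1f18e0157c05861564": "Uniswap V3 Router",
--     "0x7d2768de32b0b80b7a3454c06bdac94a69ddc7a9": "Aave V2 Lending Pool",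
--     "0x87870bca3f3fd6335c3f4ce8392d69350b4fa4e2": "Aave V3 Lending Pool",
--     "0xc36442b4a4522e871399cd717abdd847ab11fe88": "Uniswap V3 Positions NFT",
-- }
--
-- KNOWN_MALICIOUS_CONTRACTS = {
--     "0x0000000000000000000000000000000000000000": "Zero address — likely error",
--     "0xdeadbeefdeadbeefdeadbeefdeadbeefdeadbeef": "Dead address — funds unrecoverable",
-- }
--
-- # One lookup table built once: lowercased address -> (status, name).
-- _TABLE = {
--     **{k.lower(): ("safe", v) for k, v in KNOWN_SAFE_CONTRACTS.items()},
--     **{k.lower(): ("malicious", v) for k, v in KNOWN_MALICIOUS_CONTRACTS.items()},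
-- }
--
-- def check_contract(address: str) -> tuple[str, str]:
--     """Returns (status, name) — status: 'safe', 'malicious', 'unknown'"""
--     return _TABLE.get(address.lower(), ("unknown", "Unverified contract"))
-- ===== Notes on version B (the rewrite author's own statement) =====
-- stated objective: simpler
-- what changed: Replaced A's two set-comprehension membership tests each followed by a linear rescan with next() by a single precomputed lookup table mapping lowercased address to its (status, name) pair, so check_contract is one dict.get with a default.
import Mathlib
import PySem

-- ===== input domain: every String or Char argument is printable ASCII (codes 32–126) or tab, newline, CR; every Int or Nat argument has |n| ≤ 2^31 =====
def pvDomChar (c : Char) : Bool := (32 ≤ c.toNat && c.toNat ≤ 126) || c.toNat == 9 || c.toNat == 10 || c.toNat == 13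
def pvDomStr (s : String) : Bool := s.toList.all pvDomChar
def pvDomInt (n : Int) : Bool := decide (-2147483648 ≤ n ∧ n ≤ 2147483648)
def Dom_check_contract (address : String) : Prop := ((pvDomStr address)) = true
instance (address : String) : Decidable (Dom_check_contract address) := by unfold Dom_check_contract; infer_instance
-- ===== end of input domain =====

-- B replaces A's membership-test-then-rescan blocks by one precomputed (status, name) lookup table; objective: simpler.

-- ===== PORT A =====
def KNOWN_SAFE_CONTRACTS : PySem.Dict String String := PySem.Dict.ofList [
  ("0x7a250d5630b4cf539739df2c5dacb4c659f2488d", "Uniswap V2 Router"),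
  ("0xe592427a0aece92de3edee1f18e0157c05861564", "Uniswap V3 Router"),
  ("0x7d2768de32b0b80b7a3454c06bdac94a69ddc7a9", "Aave V2 Lending Pool"),
  ("0x87870bca3f3fd6335c3f4ce8392d69350b4fa4e2", "Aave V3 Lending Pool"),
  ("0xc36442b4a4522e871399cd717abdd847ab11fe88", "Uniswap V3 Positions NFT")]

def KNOWN_MALICIOUS_CONTRACTS : PySem.Dict String String := PySem.Dict.ofList [
  ("0x0000000000000000000000000000000000000000", "Zero address — likely error"),
  ("0xdeadbeefdeadbeefdeadbeefdeadbeefdeadbeef", "Dead address — funds unrecoverable")]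

-- next(v for k, v in d.items() if k.lower() == addr): first matching value
def pvFirstMatch (items : List (String × String)) (addr : String) : Option String :=
  match items with
  | [] => none
  | (k, v) :: rest => if PySem.Str.lower k = addr then some v else pvFirstMatch rest addr

def check_contract (address : String) : String × String :=
  let addr_lower := PySem.Str.lower address
  if addr_lower ∈ PySem.Set.ofList (KNOWN_SAFE_CONTRACTS.items.map (fun kv => PySem.Str.lower kv.1)) then
    match pvFirstMatch KNOWN_SAFE_CONTRACTS.items addr_lower with
    | some name => ("safe", name)
    | none => ("safe", "")   -- unreachable: membership guarantees a match
  else if addr_lower ∈ PySem.Set.ofList (KNOWN_MALICIOUS_CONTRACTS.items.map (fun kv => PySem.Str.lower kv.1)) then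
    match pvFirstMatch KNOWN_MALICIOUS_CONTRACTS.items addr_lower with
    | some name => ("malicious", name)
    | none => ("malicious", "")   -- unreachable
  else ("unknown", "Unverified contract")

-- ===== PORT B =====
def pvTable : PySem.Dict String (String × String) := PySem.Dict.ofList
  ((KNOWN_SAFE_CONTRACTS.items.map (fun kv => (PySem.Str.lower kv.1, ("safe", kv.2)))) ++
   (KNOWN_MALICIOUS_CONTRACTS.items.map (fun kv => (PySem.Str.lower kv.1, ("malicious", kv.2)))))

def check_contract_alt (address : String) : String × String :=
  pvTable.getD (PySem.Str.lower address) ("unknown", "Unverified contract")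

-- ===== PRECONDITION & SPEC =====
def Spec_check_contract (address : String) (out : String × String) : Prop := out = check_contract_alt address
instance (address : String) (out : String × String) : Decidable (Spec_check_contract address out) := by unfold Spec_check_contract; infer_instance

-- ===== CLAIM (what is proved, stated in full; the proofs are below) =====
def Claim_equal_check_contract : Prop := ∀ (address : String), Dom_check_contract address → Spec_check_contract address (check_contract address)

-- ===== LEMMAS AND PROOFS =====
-- Both sides are functions of addr_lower only; case on equality with each of the 7 keys.
theorem check_contract_eq_alt (s : String) :
    check_contract s = check_contract_alt s := by
  unfold check_contract check_contract_alt
  generalize PySem.Str.lower s = t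
  by_cases h1 : t = "0x7a250d5630b4cf539739df2c5dacb4c659f2488d" <;>
  by_cases h2 : t = "0xe592427a0aece92de3edee1f18e0157c05861564" <;>
  by_cases h3 : t = "0x7d2768de32b0b80b7a3454c06bdac94a69ddc7a9" <;>
  by_cases h4 : t = "0x87870bca3f3fd6335c3f4ce8392d69350b4fa4e2" <;>
  by_cases h5 : t = "0xc36442b4a4522e871399cd717abdd847ab11fe88" <;>
  by_cases h6 : t = "0x0000000000000000000000000000000000000000" <;>
  by_cases h7 : t = "0xdeadbeefdeadbeefdeadbeefdeadbeefdeadbeef" <;>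
  (try (subst_vars; decide))
  -- remaining case: t equals none of the seven keys
  rw [show PySem.Set.ofList (KNOWN_SAFE_CONTRACTS.items.map (fun kv => PySem.Str.lower kv.1)) =
        ["0x7a250d5630b4cf539739df2c5dacb4c659f2488d", "0xe592427a0aece92de3edee1f18e0157c05861564",
         "0x7d2768de32b0b80b7a3454c06bdac94a69ddc7a9", "0x87870bca3f3fd6335c3f4ce8392d69350b4fa4e2",
         "0xc36442b4a4522e871399cd717abdd847ab11fe88"] from rfl,
      show PySem.Set.ofList (KNOWN_MALICIOUS_CONTRACTS.items.map (fun kv => PySem.Str.lower kv.1)) =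
        ["0x0000000000000000000000000000000000000000", "0xdeadbeefdeadbeefdeadbeefdeadbeefdeadbeef"] from rfl,
      show pvTable = PySem.Dict.mk
        [("0x7a250d5630b4cf539739df2c5dacb4c659f2488d", ("safe", "Uniswap V2 Router")),
         ("0xe592427a0aece92de3edee1f18e0157c05861564", ("safe", "Uniswap V3 Router")),
         ("0x7d2768de32b0b80b7a3454c06bdac94a69ddc7a9", ("safe", "Aave V2 Lending Pool")),
         ("0x87870bca3f3fd6335c3f4ce8392d69350b4fa4e2", ("safe", "Aave V3 Lending Pool")),
         ("0xc36442b4a4522e871399cd717abdd847ab11fe88", ("safe", "Uniswap V3 Positions NFT")),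
         ("0x0000000000000000000000000000000000000000", ("malicious", "Zero address \u2014 likely error")),
         ("0xdeadbeefdeadbeefdeadbeefdeadbeefdeadbeef", ("malicious", "Dead address \u2014 funds unrecoverable"))] from rfl]
  simp [PySem.Dict.getD, PySem.Dict.get?, h1, h2, h3, h4, h5, h6, h7,
    Ne.symm h1, Ne.symm h2, Ne.symm h3, Ne.symm h4, Ne.symm h5, Ne.symm h6, Ne.symm h7]

-- ===== VERDICT (by name: the statement is the Claim_ definition above) =====
theorem check_contract_spec : Claim_equal_check_contract := by
  intro address _
  exact check_contract_eq_alt address
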